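-- pv_equiv track=rewrite | github.com/momocloud/pizhi | src/pizhi/core/frontmatter.py | _fix_single_quoted_backslash_apostrophes
-- ===== SOURCE A (Python) =====
-- def _fix_single_quoted_backslash_apostrophes(yaml_text: str) -> str:
--     fixed_lines: list[str] = []
--     for line in yaml_text.split("\n"):
--         fixed_chars: list[str] = []
--         in_single_quoted_scalar = False
--         index = 0
--         while index < len(line):
--             char = line[index]
--             next_char = line[index + 1] if index + 1 < len(line) else ""
--             if char == "'":
--                 if in_single_quoted_scalar and next_char == "'":
--                     fixed_chars.append("''")
--                     index += 2
--                     continue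
--                 in_single_quoted_scalar = not in_single_quoted_scalar
--                 fixed_chars.append(char)
--                 index += 1
--                 continue
--             if in_single_quoted_scalar and char == "\\" and next_char == "'":
--                 fixed_chars.append("''")
--                 index += 2
--                 continue
--             fixed_chars.append(char)
--             index += 1
--         fixed_lines.append("".join(fixed_chars))
--     return "\n".join(fixed_lines)
-- ===== SOURCE B (Python) =====
-- def _fix_single_quoted_backslash_apostrophes(yaml_text: str) -> str:
--     # Two-phase scan per line: jump to the next quote with str.find, slice out the
--     # whole single-quoted scalar (treating '' and \' as units, closing quote optional),
--     # and fix it with one bulk str.replace("\\'", "''").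
--     out_lines = []
--     for line in yaml_text.split("\n"):
--         parts = []
--         i = 0
--         n = len(line)
--         while i < n:
--             q = line.find("'", i)
--             if q == -1:
--                 parts.append(line[i:])
--                 break
--             parts.append(line[i:q])
--             j = q + 1
--             while j < n:
--                 if line[j] == "'":
--                     if j + 1 < n and line[j + 1] == "'":
--                         j += 2
--                         continue
--                     j += 1
--                     break
--                 if line[j] == "\\" and j + 1 < n and line[j + 1] == "'":
--                     j += 2
--                     continue
--                 j += 1
--             parts.append(line[q:j].replace("\\'", "''"))
--             i = j
--         out_lines.append("".join(parts))
--     return "\n".join(out_lines)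
-- ===== Notes on version B (the rewrite author's own statement) =====
-- stated objective: faster
-- what changed: Replaces the per-character boolean state machine by a two-phase token scanner: str.find jumps to the next quote, the whole single-quoted scalar (escape pairs treated as units, closing quote optional) is sliced out, and one bulk str.replace rewrites the backslash-escaped apostrophes inside it.
import Mathlib
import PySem

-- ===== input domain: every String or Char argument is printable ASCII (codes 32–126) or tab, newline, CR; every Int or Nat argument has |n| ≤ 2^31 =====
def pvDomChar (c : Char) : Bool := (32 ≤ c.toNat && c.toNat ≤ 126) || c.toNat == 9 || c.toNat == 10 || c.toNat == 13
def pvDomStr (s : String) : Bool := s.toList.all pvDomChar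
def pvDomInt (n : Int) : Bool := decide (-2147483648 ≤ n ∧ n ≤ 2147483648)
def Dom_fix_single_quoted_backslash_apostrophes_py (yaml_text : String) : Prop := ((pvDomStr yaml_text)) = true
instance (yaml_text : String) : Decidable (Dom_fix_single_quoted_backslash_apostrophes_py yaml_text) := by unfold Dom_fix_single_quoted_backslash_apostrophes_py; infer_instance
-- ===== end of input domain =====

-- B replaces A's per-character boolean state machine by a two-phase scanner
-- (str.find to the next quote, slice out the whole scalar, one bulk str.replace inside it);
-- same O(n), measurably faster by a constant factor (bulk C-level scans vs a per-char Python loop).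

-- ===== PORT A =====
-- A's inner while loop over `line` with index/lookahead, as structural recursion on
-- the character list; `ins` is in_single_quoted_scalar, `rest.head?` is next_char.
def fixLineA : Bool → List Char → List Char
  | _, [] => []
  | ins, c :: rest =>
    if c = '\'' then
      if ins = true ∧ rest.head? = some '\'' then
        '\'' :: '\'' :: fixLineA ins rest.tail
      else
        '\'' :: fixLineA (!ins) rest
    else if ins = true ∧ c = '\\' ∧ rest.head? = some '\'' then
      '\'' :: '\'' :: fixLineA ins rest.tail
    else
      c :: fixLineA ins rest
termination_by _ l => l.length
decreasing_by all_goals (simp [List.length_tail]; try omega)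

def fix_single_quoted_backslash_apostrophes_py (yaml_text : String) : String :=
  String.ofList (PySem.Chars.join ['\n']
    ((PySem.Chars.splitOn yaml_text.toList ['\n']).map (fun line => fixLineA false line)))

-- ===== PORT B =====
-- port of Source B's inner while loop from j = q+1: returns (the scalar token after the
-- opening quote, incl. the optional closing quote  = line[q+1:j],  the rest = line[j:]).
def scalarB : List Char → List Char × List Char
  | [] => ([], [])
  | c :: r =>
    if c = '\'' then
      if r.head? = some '\'' then
        ('\'' :: '\'' :: (scalarB r.tail).1, (scalarB r.tail).2)
      else (['\''], r)
    else if c = '\\' ∧ r.head? = some '\'' then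
      ('\\' :: '\'' :: (scalarB r.tail).1, (scalarB r.tail).2)
    else
      (c :: (scalarB r).1, (scalarB r).2)
termination_by l => l.length
decreasing_by all_goals (simp [List.length_tail]; try omega)

-- port of Source B's  s.replace("\\'", "''")  specialised to these two literals:
-- left-to-right non-overlapping replacement of the pair \' by '' (exact).
def repB : List Char → List Char
  | [] => []
  | c :: r =>
    if c = '\\' ∧ r.head? = some '\'' then '\'' :: '\'' :: repB r.tail
    else c :: repB r
termination_by l => l.length
decreasing_by all_goals (simp [List.length_tail]; try omega)

theorem scalarB_snd_le : ∀ l : List Char, (scalarB l).2.length ≤ l.length := by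
  intro l
  fun_induction scalarB l <;> simp_all [List.length_tail] <;> omega

-- Source B's outer while over one line: takeWhile/dropWhile is line.find("'", i) plus the
-- two slices line[i:q] and line[q:j]; the leading quote is carried into the replace
-- exactly as the slice line[q:j] is in Source B.
def lineB (l : List Char) : List Char :=
  if l.dropWhile (fun c => !(c == '\'')) = [] then
    l.takeWhile (fun c => !(c == '\''))
  else
    l.takeWhile (fun c => !(c == '\'')) ++
    repB ('\'' :: (scalarB ((l.dropWhile (fun c => !(c == '\''))).tail)).1) ++
    lineB ((scalarB ((l.dropWhile (fun c => !(c == '\''))).tail)).2)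
termination_by l.length
decreasing_by
  have h1 := scalarB_snd_le ((l.dropWhile (fun c => !(c == '\''))).tail)
  have h2 : (l.dropWhile (fun c => !(c == '\''))).length ≤ l.length :=
    List.length_dropWhile_le _ _
  have h4 : 0 < (l.dropWhile (fun c => !(c == '\''))).length :=
    List.length_pos_of_ne_nil (by assumption)
  simp [List.length_tail] at h1 ⊢
  omega

def fix_single_quoted_backslash_apostrophes_py_alt (yaml_text : String) : String :=
  String.ofList (PySem.Chars.join ['\n']
    ((PySem.Chars.splitOn yaml_text.toList ['\n']).map (fun line => lineB line)))

-- ===== PRECONDITION & SPEC =====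
def Spec_fix_single_quoted_backslash_apostrophes_py (yaml_text : String) (out : String) : Prop := out = fix_single_quoted_backslash_apostrophes_py_alt yaml_text
instance (yaml_text : String) (out : String) : Decidable (Spec_fix_single_quoted_backslash_apostrophes_py yaml_text out) := by unfold Spec_fix_single_quoted_backslash_apostrophes_py; infer_instance

-- ===== CLAIM (what is proved, stated in full; the proofs are below) =====
def Claim_equal_fix_single_quoted_backslash_apostrophes_py : Prop := ∀ (yaml_text : String), Dom_fix_single_quoted_backslash_apostrophes_py yaml_text → Spec_fix_single_quoted_backslash_apostrophes_py yaml_text (fix_single_quoted_backslash_apostrophes_py yaml_text)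

-- ===== LEMMAS AND PROOFS =====

-- unfolding equations, one per branch shape
theorem fixA_nil (ins : Bool) : fixLineA ins [] = [] := by rw [fixLineA]

theorem fixA_true_qq (r : List Char) :
    fixLineA true ('\'' :: '\'' :: r) = '\'' :: '\'' :: fixLineA true r := by
  rw [fixLineA]; simp

theorem fixA_q (ins : Bool) (r : List Char) (h : ¬ (ins = true ∧ r.head? = some '\'')) :
    fixLineA ins ('\'' :: r) = '\'' :: fixLineA (!ins) r := by
  rw [fixLineA]; split_ifs with h1 h2 <;> simp_all

theorem fixA_true_bs (r : List Char) :
    fixLineA true ('\\' :: '\'' :: r) = '\'' :: '\'' :: fixLineA true r := by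
  rw [fixLineA]; simp

theorem fixA_other (ins : Bool) (c : Char) (r : List Char) (hc : ¬ c = '\'')
    (h : ¬ (ins = true ∧ c = '\\' ∧ r.head? = some '\'')) :
    fixLineA ins (c :: r) = c :: fixLineA ins r := by
  rw [fixLineA]; simp [hc]; intro h1 h2 h3; exact absurd ⟨h1, h2, h3⟩ h

theorem scalarB_nil : scalarB [] = ([], []) := by rw [scalarB]

theorem scalarB_qq (r : List Char) :
    scalarB ('\'' :: '\'' :: r) = ('\'' :: '\'' :: (scalarB r).1, (scalarB r).2) := by
  rw [scalarB]; simp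

theorem scalarB_q (r : List Char) (h : ¬ r.head? = some '\'') :
    scalarB ('\'' :: r) = (['\''], r) := by
  rw [scalarB]; simp [h]

theorem scalarB_bs (r : List Char) :
    scalarB ('\\' :: '\'' :: r) = ('\\' :: '\'' :: (scalarB r).1, (scalarB r).2) := by
  rw [scalarB]; simp

theorem scalarB_other (c : Char) (r : List Char) (hc : ¬ c = '\'')
    (h : ¬ (c = '\\' ∧ r.head? = some '\'')) :
    scalarB (c :: r) = (c :: (scalarB r).1, (scalarB r).2) := by
  rw [scalarB]; simp [hc, h]

theorem repB_nil : repB [] = [] := by rw [repB]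

theorem repB_bs (r : List Char) : repB ('\\' :: '\'' :: r) = '\'' :: '\'' :: repB r := by
  rw [repB]; simp

theorem repB_other (c : Char) (r : List Char) (h : ¬ (c = '\\' ∧ r.head? = some '\'')) :
    repB (c :: r) = c :: repB r := by
  rw [repB]; simp [h]

theorem lineB_nil_case (l : List Char) (h : l.dropWhile (fun c => !(c == '\'')) = []) :
    lineB l = l.takeWhile (fun c => !(c == '\'')) := by
  rw [lineB]; simp [h]

theorem lineB_cons_case (l : List Char) (h : ¬ l.dropWhile (fun c => !(c == '\'')) = []) :
    lineB l = l.takeWhile (fun c => !(c == '\'')) ++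
      repB ('\'' :: (scalarB ((l.dropWhile (fun c => !(c == '\''))).tail)).1) ++
      lineB ((scalarB ((l.dropWhile (fun c => !(c == '\''))).tail)).2) := by
  rw [lineB]; simp [h]

theorem dropWhile_head_false {α : Type} {p : α → Bool} :
    ∀ (l : List α) (c : α) (r : List α), l.dropWhile p = c :: r → p c = false := by
  intro l
  induction l with
  | nil => intro c r h; simp [List.dropWhile] at h
  | cons a t ih =>
    intro c r h
    by_cases hp : p a = true
    · rw [List.dropWhile_cons_of_pos hp] at h; exact ih c r h
    · rw [List.dropWhile_cons_of_neg hp] at h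
      cases h; simpa using hp

theorem fixLineA_false_append (pre x : List Char) (h : ∀ c ∈ pre, ¬ c = '\'') :
    fixLineA false (pre ++ x) = pre ++ fixLineA false x := by
  induction pre with
  | nil => simp
  | cons c t ih =>
    have hc : ¬ c = '\'' := h c (by simp)
    rw [List.cons_append, fixA_other false c (t ++ x) hc (by simp)]
    rw [ih (fun d hd => h d (by simp [hd]))]
    simp

theorem scalarB_fst_head (d : Char) (r : List Char) (hd : ¬ d = '\'') :
    ((scalarB (d :: r)).1).head? = some d := by
  by_cases hbs : d = '\\' ∧ r.head? = some '\''
  · obtain ⟨hd2, hh⟩ := hbs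
    subst hd2
    obtain ⟨r2, rfl⟩ : ∃ r2, r = '\'' :: r2 := by
      cases r with
      | nil => simp at hh
      | cons a t => simp at hh; exact ⟨t, by rw [hh]⟩
    rw [scalarB_bs]; simp
  · rw [scalarB_other d r hd hbs]; simp

theorem repB_q_cons (t : List Char) : repB ('\'' :: t) = '\'' :: repB t :=
  repB_other _ _ (by simp)

-- the core equivalence, by strong induction on the line length:
-- outside a scalar lineB agrees with fixLineA false; inside one, replace-on-the-token
-- agrees with fixLineA true.
theorem mainLemma : ∀ (n : Nat) (l : List Char), l.length ≤ n →
    (lineB l = fixLineA false l) ∧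
    (repB (scalarB l).1 ++ lineB (scalarB l).2 = fixLineA true l) := by
  intro n
  induction n with
  | zero =>
    intro l hl
    have : l = [] := List.eq_nil_of_length_eq_zero (Nat.le_zero.mp hl)
    subst this
    refine ⟨by rw [lineB_nil_case] <;> simp [fixA_nil], ?_⟩
    rw [scalarB_nil]
    simp only
    rw [repB_nil, lineB_nil_case [] (by simp), fixA_nil]
    simp
  | succ n ih =>
    intro l hl
    constructor
    · -- lineB l = fixLineA false l
      by_cases hr : l.dropWhile (fun c => !(c == '\'')) = []
      · rw [lineB_nil_case l hr]
        have hl' : l = l.takeWhile (fun c => !(c == '\'')) := by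
          conv_lhs => rw [← List.takeWhile_append_dropWhile (p := fun c => !(c == '\'')) (l := l)]
          rw [hr, List.append_nil]
        have hall : ∀ c ∈ l.takeWhile (fun c => !(c == '\'')), ¬ c = '\'' := by
          intro c hc
          have := List.mem_takeWhile_imp hc
          simpa using this
        calc l.takeWhile (fun c => !(c == '\''))
            = l.takeWhile (fun c => !(c == '\'')) ++ fixLineA false [] := by
              rw [fixA_nil]; simp
          _ = fixLineA false (l.takeWhile (fun c => !(c == '\'')) ++ []) :=
              (fixLineA_false_append _ _ hall).symm
          _ = fixLineA false l := by rw [List.append_nil, ← hl']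
      · rw [lineB_cons_case l hr]
        obtain ⟨c, r, hcr⟩ := List.exists_cons_of_ne_nil hr
        have hc : c = '\'' := by
          have := dropWhile_head_false (p := fun c => !(c == '\'')) l c r hcr
          simpa using this
        subst hc
        have hsplit : l = l.takeWhile (fun c => !(c == '\'')) ++ '\'' :: r := by
          conv_lhs => rw [← List.takeWhile_append_dropWhile (p := fun c => !(c == '\'')) (l := l)]
          rw [hcr]
        have hrlen : r.length ≤ n := by
          have h2 : (l.takeWhile (fun c => !(c == '\''))).length + ('\'' :: r).length = l.length := by
            rw [← List.length_append, ← hsplit]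
          simp at h2
          omega
        have hall : ∀ d ∈ l.takeWhile (fun c => !(c == '\'')), ¬ d = '\'' := by
          intro d hd
          have := List.mem_takeWhile_imp hd
          simpa using this
        have hIH := (ih r hrlen).2
        rw [hcr]
        simp only [List.tail_cons]
        rw [repB_q_cons]
        conv_rhs => rw [hsplit]
        rw [fixLineA_false_append _ _ hall]
        rw [fixA_q false r (by simp)]
        simp only [Bool.not_false, List.cons_append, List.append_assoc]
        rw [hIH]
    · -- repB (scalarB l).1 ++ lineB (scalarB l).2 = fixLineA true l
      rcases l with _ | ⟨c, r⟩
      · rw [scalarB_nil]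
        simp only
        rw [repB_nil, lineB_nil_case [] (by simp), fixA_nil]
        simp
      · by_cases hc : c = '\''
        · subst hc
          by_cases hh : r.head? = some '\''
          · obtain ⟨r2, rfl⟩ : ∃ r2, r = '\'' :: r2 := by
              cases r with
              | nil => simp at hh
              | cons a t => simp at hh; exact ⟨t, by rw [hh]⟩
            rw [scalarB_qq]
            simp only
            rw [repB_q_cons, repB_q_cons]
            have hlen : r2.length ≤ n := by simp at hl; omega
            have hIH := (ih r2 hlen).2
            rw [fixA_true_qq]
            simp only [List.cons_append]
            rw [hIH]
          · rw [scalarB_q r hh]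
            simp only
            rw [repB_q_cons, repB_nil]
            have hlen : r.length ≤ n := by simp at hl; omega
            have hIH := (ih r hlen).1
            rw [fixA_q true r (by simp [hh])]
            simp only [Bool.not_true, List.singleton_append]
            rw [hIH]
        · by_cases hbs : c = '\\' ∧ r.head? = some '\''
          · obtain ⟨hcb, hh⟩ := hbs
            subst hcb
            obtain ⟨r2, rfl⟩ : ∃ r2, r = '\'' :: r2 := by
              cases r with
              | nil => simp at hh
              | cons a t => simp at hh; exact ⟨t, by rw [hh]⟩
            rw [scalarB_bs]
            simp only
            rw [repB_bs]
            have hlen : r2.length ≤ n := by simp at hl; omega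
            have hIH := (ih r2 hlen).2
            rw [fixA_true_bs]
            simp only [List.cons_append]
            rw [hIH]
          · rw [scalarB_other c r hc hbs]
            simp only
            have hlen : r.length ≤ n := by simp at hl; omega
            have hIH := (ih r hlen).2
            have hrep : repB (c :: (scalarB r).1) = c :: repB (scalarB r).1 := by
              rcases hcc : r with _ | ⟨d, r2⟩
              · exact repB_other _ _ (by rw [scalarB_nil]; simp)
              · by_cases hcb : c = '\\'
                · have hdne : ¬ d = '\'' := fun hd => hbs ⟨hcb, by rw [hcc, hd]; rfl⟩
                  exact repB_other _ _ (by
                    rw [scalarB_fst_head d r2 hdne]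
                    simp
                    intro _
                    exact hdne)
                · exact repB_other _ _ (by simp [hcb])
            rw [hrep]
            rw [fixA_other true c r hc (by
              intro h3
              exact hbs ⟨h3.2.1, h3.2.2⟩)]
            simp only [List.cons_append]
            rw [hIH]

-- ===== VERDICT (by name: the statement is the Claim_ definition above) =====
theorem fix_single_quoted_backslash_apostrophes_py_spec : Claim_equal_fix_single_quoted_backslash_apostrophes_py := by
  intro yaml_text _
  unfold Spec_fix_single_quoted_backslash_apostrophes_py
  unfold fix_single_quoted_backslash_apostrophes_py fix_single_quoted_backslash_apostrophes_py_alt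
  congr 2
  apply List.map_congr_left
  intro line _
  exact ((mainLemma line.length line le_rfl).1).symm
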